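-- pv_equiv track=rewrite | github.com/GodOrGovern/Project_Euler | problems/Python/e516.py | all_prod_combs
-- ===== SOURCE A (Python) =====
-- def all_prod_combs(ints, end):
--     ''' Returns a sorted list of all possible products (below end) obtained
--     from multiplying elements in ints without repeating elements. '''
--     def helper(num, bases):
--         ''' Returns a list of all possible products (below end) using num
--         exactly once and each number in bases either zero or once '''
--         prods = []
--         recurse = True
--         for i, b in enumerate(bases):
--             val = num*b
--             if val > end:
--                 break
--             prods += [val]
--             if val*ints[0] <= end:
--                 prods += helper(val, bases[i+1:])
--         return prods
--     return sorted(helper(1, ints))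
-- ===== SOURCE B (Python) =====
-- def all_prod_combs(ints, end):
--     ''' Returns a sorted list of all possible products (below end) obtained
--     from multiplying elements in ints without repeating elements. '''
--     results = []
--     stack = [(1, 0)]
--     while stack:
--         prod, start = stack.pop()
--         if start >= len(ints):
--             continue
--         val = prod * ints[start]
--         if val > end:
--             continue
--         results.append(val)
--         stack.append((prod, start + 1))          # continue the scan with the same product
--         if val * ints[0] <= end:
--             stack.append((val, start + 1))       # explore subsets extending by ints[start]
--     return sorted(results)
-- ===== Notes on version B (the rewrite author's own statement) =====
-- stated objective: alternative
-- what changed: Replaced the nested recursive helper (inner for-loop with break and recursive calls on freshly sliced list suffixes) by an explicit iterative LIFO worklist of (product, start-index) frames processed one element at a time; no recursion and no slice copies.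
import Mathlib
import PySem

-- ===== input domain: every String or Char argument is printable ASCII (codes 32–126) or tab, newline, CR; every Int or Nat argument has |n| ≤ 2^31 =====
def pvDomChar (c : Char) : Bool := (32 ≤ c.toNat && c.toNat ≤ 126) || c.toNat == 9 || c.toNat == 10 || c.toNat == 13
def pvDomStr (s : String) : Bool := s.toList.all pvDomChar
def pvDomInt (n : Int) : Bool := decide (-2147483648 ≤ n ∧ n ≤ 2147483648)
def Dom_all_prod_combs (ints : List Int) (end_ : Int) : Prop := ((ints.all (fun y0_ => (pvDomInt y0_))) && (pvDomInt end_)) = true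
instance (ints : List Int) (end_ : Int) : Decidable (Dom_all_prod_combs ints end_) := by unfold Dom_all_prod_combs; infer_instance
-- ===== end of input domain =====

-- B replaces A's recursive helper (inner for-loop + recursion on list suffixes) by an
-- explicit iterative LIFO worklist of (product, start-index) frames; same results, same cost class.


-- ===== PORT A =====
-- helper(num, bases): for i,b in enumerate(bases): val=num*b; break if val>end;
-- prods += [val]; if val*ints[0]<=end: prods += helper(val, bases[i+1:]).
-- 'first' carries Python's ints[0]; it is only ever read when ints ≠ [] (the loop body
-- never runs on an empty list), so passing ints.headD 0 is exact.
def helperA (end_ first num : Int) : List Int → List Int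
  | [] => []
  | b :: rest =>
    let val := num * b
    if val > end_ then []
    else val :: ((if val * first ≤ end_ then helperA end_ first val rest else []) ++
                 helperA end_ first num rest)

def all_prod_combs (ints : List Int) (end_ : Int) : List Int :=
  PySem.List.sorted (helperA end_ (ints.headD 0) 1 ints) (fun x => x) false

-- ===== PORT B =====
-- Explicit worklist: pop (prod, start); skip if start out of range or prod*ints[start] > end;
-- otherwise emit val, push the continuation frame, then (conditionally) the extension frame
-- (head of the list = top of the stack, so the extension frame is popped first).
-- 'ints.headD 0' is Python's ints[0], read only when start < len(ints) (hence ints ≠ []).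
-- The fuel argument only makes the while-loop total (stackFuel bounds the number of
-- iterations; see stackGo_eq below): the zero-fuel branch is never reached.
def stackFuel (n : Nat) (stack : List (Int × Nat)) : Nat :=
  (stack.map (fun f => 3 ^ (n - f.2))).sum

def stackGo (ints : List Int) (end_ : Int) : Nat → List (Int × Nat) → List Int
  | _, [] => []
  | 0, _ :: _ => []
  | fuel + 1, (prod, start) :: rest =>
    if h : start < ints.length then
      let val := prod * ints[start]
      if val > end_ then stackGo ints end_ fuel rest
      else val :: stackGo ints end_ fuel
            ((if val * ints.headD 0 ≤ end_ then [(val, start + 1)] else []) ++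
             (prod, start + 1) :: rest)
    else stackGo ints end_ fuel rest

def all_prod_combs_alt (ints : List Int) (end_ : Int) : List Int :=
  PySem.List.sorted (stackGo ints end_ (stackFuel ints.length [(1, 0)]) [(1, 0)]) (fun x => x) false

-- ===== PRECONDITION & SPEC =====
def Spec_all_prod_combs (ints : List Int) (end_ : Int) (out : List Int) : Prop := out = all_prod_combs_alt ints end_
instance (ints : List Int) (end_ : Int) (out : List Int) : Decidable (Spec_all_prod_combs ints end_ out) := by unfold Spec_all_prod_combs; infer_instance

-- ===== CLAIM (what is proved, stated in full; the proofs are below) =====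
def Claim_equal_all_prod_combs : Prop := ∀ (ints : List Int) (end_ : Int), Dom_all_prod_combs ints end_ → Spec_all_prod_combs ints end_ (all_prod_combs ints end_)

-- ===== LEMMAS AND PROOFS =====
-- The stack machine emits, frame by frame, exactly the sequence helperA emits on the
-- corresponding suffix of ints.
-- With enough fuel (stackFuel bounds the iteration count), the stack machine emits,
-- frame by frame, exactly the sequence helperA emits on the corresponding suffix of ints.
lemma stackGo_eq (ints : List Int) (end_ : Int) :
    ∀ (fuel : Nat) (stack : List (Int × Nat)), stackFuel ints.length stack ≤ fuel →
      stackGo ints end_ fuel stack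
        = (stack.map (fun f => helperA end_ (ints.headD 0) f.1 (ints.drop f.2))).flatten := by
  intro fuel
  induction fuel with
  | zero =>
    intro stack hs
    match stack with
    | [] => simp [stackGo]
    | a :: rest =>
      exfalso
      have h1 : 1 ≤ 3 ^ (ints.length - a.2) := Nat.one_le_pow _ _ (by norm_num)
      simp only [stackFuel, List.map_cons, List.sum_cons] at hs
      omega
  | succ fuel ih =>
    intro stack hs
    match stack with
    | [] => simp [stackGo]
    | (prod, start) :: rest =>
      have h1 : 1 ≤ 3 ^ (ints.length - start) := Nat.one_le_pow _ _ (by norm_num)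
      have hrest : stackFuel ints.length rest ≤ fuel := by
        simp [stackFuel] at hs ⊢; omega
      rw [stackGo]
      by_cases h : start < ints.length
      · rw [dif_pos h]
        by_cases hgt : prod * ints[start] > end_
        · rw [if_pos hgt, ih rest hrest]
          rw [List.map_cons, List.flatten_cons, List.drop_eq_getElem_cons h, helperA]
          simp only []
          rw [if_pos hgt]
          simp
        · have h3 : ints.length - start = (ints.length - (start + 1)) + 1 := by omega
          have hp : 0 < 3 ^ (ints.length - (start + 1)) := Nat.pow_pos (by norm_num)
          have hpush : stackFuel ints.length
              ((if prod * ints[start] * ints.headD 0 ≤ end_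
                 then [(prod * ints[start], start + 1)] else []) ++
               (prod, start + 1) :: rest) ≤ fuel := by
            simp only [stackFuel] at hs ⊢
            split_ifs <;> simp [h3, pow_succ] at hs ⊢ <;> omega
          rw [if_neg hgt, ih _ hpush]
          rw [List.map_cons, List.flatten_cons, List.drop_eq_getElem_cons h, helperA]
          simp only []
          rw [if_neg hgt]
          split_ifs with hc <;> simp
      · rw [dif_neg h, ih rest hrest]
        have hd : ints.drop start = [] := List.drop_eq_nil_of_le (by omega)
        simp [hd, helperA]

-- ===== VERDICT (by name: the statement is the Claim_ definition above) =====
theorem all_prod_combs_spec : Claim_equal_all_prod_combs := by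
  intro ints end_ _
  unfold Spec_all_prod_combs all_prod_combs all_prod_combs_alt
  rw [stackGo_eq ints end_ _ _ (le_refl _)]
  simp
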